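-- pv_equiv track=rewrite | github.com/Fraunhofer-FIT-DSAI/SASP | SASP/sasp/util/object_alter_util.py | wide_tup_list_to_dict
-- ===== SOURCE A (Python) =====
-- def wide_tup_list_to_dict(instance_tups):
--     """Converts a wide tuple list into a dictionary. This essentially makes
--     it narrow and then converts it into a dictionary. This is mainly required
--     for the use in creating an instance query.
--
--     Args:
--         instance_tups (List[Tuple[str, str]]): Wide tuple list of the instance
--
--     Returns:
--         Dict: Narrow tuple list as a dictionary
--     """
--     new_dict = {}
--     for attr, value in instance_tups:
--         if attr in new_dict:
--             new_dict[attr] = f'{new_dict[attr]},{value}'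
--         else:
--             new_dict[attr] = value
--
--     return new_dict
-- ===== SOURCE B (Python) =====
-- def wide_tup_list_to_dict(instance_tups):
--     """Two-phase rewrite: group values per attribute, then join each group."""
--     groups = {}
--     for attr, value in instance_tups:
--         groups.setdefault(attr, []).append(value)
--     return {attr: ','.join(values) for attr, values in groups.items()}
-- ===== Notes on version B (the rewrite author's own statement) =====
-- stated objective: simpler
-- what changed: Replaces the inline membership-test/string-concatenation branch by two phases: one grouping pass building attr -> list of values, then a comprehension joining each group with ','.join.
import Mathlib
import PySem

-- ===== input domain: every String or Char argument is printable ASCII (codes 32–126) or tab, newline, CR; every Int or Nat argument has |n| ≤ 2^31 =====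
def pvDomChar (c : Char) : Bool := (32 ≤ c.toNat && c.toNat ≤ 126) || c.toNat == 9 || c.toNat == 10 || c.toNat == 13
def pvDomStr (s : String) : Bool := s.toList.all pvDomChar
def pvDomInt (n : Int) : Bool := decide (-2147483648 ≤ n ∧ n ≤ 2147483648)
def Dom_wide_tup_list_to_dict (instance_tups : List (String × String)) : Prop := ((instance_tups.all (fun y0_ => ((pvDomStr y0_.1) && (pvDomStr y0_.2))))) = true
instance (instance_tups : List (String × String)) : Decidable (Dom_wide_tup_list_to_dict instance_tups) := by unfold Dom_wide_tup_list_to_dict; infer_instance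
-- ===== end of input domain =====

-- B replaces A's inline membership-test/concatenation branch by two phases (group values per key, then join each group); objective: simpler.


-- ===== PORT A =====
-- for attr, value in instance_tups: if attr in new_dict: concat with ',' else insert
def wide_tup_list_to_dict (instance_tups : List (String × String)) : List (String × String) :=
  (instance_tups.foldl
    (fun new_dict p =>
      if new_dict.contains p.1 then
        new_dict.insert p.1 (new_dict.getD p.1 "" ++ "," ++ p.2)
      else
        new_dict.insert p.1 p.2)
    PySem.Dict.empty).items

-- ===== PORT B =====
-- phase 1: groups.setdefault(attr, []).append(value); phase 2: comprehension joining each group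
def wide_tup_list_to_dict_alt (instance_tups : List (String × String)) : List (String × String) :=
  let groups : PySem.Dict String (List String) :=
    instance_tups.foldl (fun d p => d.modify p.1 [] (fun vs => vs ++ [p.2])) PySem.Dict.empty
  groups.items.map (fun p => (p.1, PySem.Str.join "," p.2))

-- ===== PRECONDITION & SPEC =====
def Spec_wide_tup_list_to_dict (instance_tups : List (String × String)) (out : List (String × String)) : Prop := out = wide_tup_list_to_dict_alt instance_tups
instance (instance_tups : List (String × String)) (out : List (String × String)) : Decidable (Spec_wide_tup_list_to_dict instance_tups out) := by unfold Spec_wide_tup_list_to_dict; infer_instance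

-- ===== CLAIM (what is proved, stated in full; the proofs are below) =====
def Claim_equal_wide_tup_list_to_dict : Prop := ∀ (instance_tups : List (String × String)), Dom_wide_tup_list_to_dict instance_tups → Spec_wide_tup_list_to_dict instance_tups (wide_tup_list_to_dict instance_tups)

-- ===== LEMMAS AND PROOFS =====

-- one step of A's accumulation, seen on the optional current value of a key
def pvStep (o : Option String) (v : String) : Option String :=
  some (match o with
        | none => v
        | some s => s ++ "," ++ v)

theorem pvJoin_shift (s v : String) (vs : List String) :
    PySem.Str.join "," (s :: v :: vs) = PySem.Str.join "," ((s ++ "," ++ v) :: vs) := by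
  apply String.toList_injective
  cases vs with
  | nil => simp [PySem.Str.toList_join, PySem.Chars.join, List.intercalate]
  | cons w ws =>
      simp only [PySem.Str.toList_join, List.map_cons]
      rw [PySem.Chars.join_cons_cons, PySem.Chars.join_cons_cons, PySem.Chars.join_cons_cons]
      simp

theorem pvFoldl_step_join (vs : List String) (s : String) :
    vs.foldl pvStep (some s) = some (PySem.Str.join "," (s :: vs)) := by
  induction vs generalizing s with
  | nil =>
      simp only [List.foldl_nil]
      congr 1
      apply String.toList_injective
      simp [PySem.Str.toList_join, PySem.Chars.join, List.intercalate]
  | cons v vs ih =>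
      simp only [List.foldl_cons, pvStep]
      rw [ih, pvJoin_shift]

-- A's loop, characterised through get?
theorem pvA_get? (l : List (String × String)) (d : PySem.Dict String String) (k : String) :
    (l.foldl
      (fun new_dict p =>
        if new_dict.contains p.1 then
          new_dict.insert p.1 (new_dict.getD p.1 "" ++ "," ++ p.2)
        else
          new_dict.insert p.1 p.2) d).get? k
    = ((l.filter (fun p => p.1 == k)).map (fun p => p.2)).foldl pvStep (d.get? k) := by
  induction l generalizing d with
  | nil => rfl
  | cons p rest ih =>
      simp only [List.foldl_cons]
      rw [ih]
      by_cases hk : p.1 = k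
      · subst hk
        rw [List.filter_cons_of_pos (by simp)]
        simp only [List.map_cons, List.foldl_cons]
        congr 1
        by_cases hc : d.contains p.1
        · have hsome : (d.get? p.1).isSome := by
            rw [← PySem.Dict.contains_eq_isSome_get? d p.1]; exact hc
          rcases Option.isSome_iff_exists.mp hsome with ⟨s, hs⟩
          rw [if_pos hc, PySem.Dict.get?_insert, if_pos rfl, PySem.Dict.getD_eq_get?_getD, hs]
          rfl
        · have hn : d.get? p.1 = none := by
            rw [PySem.Dict.contains_eq_isSome_get?] at hc
            exact Option.not_isSome_iff_eq_none.mp hc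
          rw [if_neg hc, PySem.Dict.get?_insert, if_pos rfl, hn]
          rfl
      · rw [List.filter_cons_of_neg (by simp [hk])]
        congr 1
        by_cases hc : d.contains p.1 <;>
          simp [hc, PySem.Dict.get?_insert, Ne.symm hk]

-- A's step in insert-normal form (so the generic keys/nodup foldl lemmas apply)
theorem pvA_fold_eq (l : List (String × String)) (d : PySem.Dict String String) :
    l.foldl
      (fun new_dict p =>
        if new_dict.contains p.1 then
          new_dict.insert p.1 (new_dict.getD p.1 "" ++ "," ++ p.2)
        else
          new_dict.insert p.1 p.2) d
    = l.foldl
      (fun new_dict p =>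
        new_dict.insert p.1
          (if new_dict.contains p.1 then new_dict.getD p.1 "" ++ "," ++ p.2 else p.2)) d := by
  have hf : (fun (new_dict : PySem.Dict String String) (p : String × String) =>
      if new_dict.contains p.1 then
        new_dict.insert p.1 (new_dict.getD p.1 "" ++ "," ++ p.2)
      else
        new_dict.insert p.1 p.2)
    = (fun new_dict p =>
        new_dict.insert p.1
          (if new_dict.contains p.1 then new_dict.getD p.1 "" ++ "," ++ p.2 else p.2)) := by
    funext new_dict p
    by_cases h : new_dict.contains p.1 <;> simp [h]
  rw [hf]

theorem wide_tup_list_to_dict_eq_alt (l : List (String × String)) :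
    wide_tup_list_to_dict l = wide_tup_list_to_dict_alt l := by
  unfold wide_tup_list_to_dict wide_tup_list_to_dict_alt
  dsimp only
  set dA := l.foldl
      (fun new_dict p =>
        if new_dict.contains p.1 then
          new_dict.insert p.1 (new_dict.getD p.1 "" ++ "," ++ p.2)
        else
          new_dict.insert p.1 p.2) PySem.Dict.empty with hdA
  set dG := l.foldl (fun d p => d.modify p.1 [] (fun vs => vs ++ [p.2])) PySem.Dict.empty with hdG
  have hkeysA : dA.keys = PySem.Set.update [] (l.map (fun p => p.1)) := by
    rw [hdA, pvA_fold_eq]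
    rw [PySem.Dict.keys_foldl_insert_key l (fun p => p.1)
      (fun new_dict p => if new_dict.contains p.1 then new_dict.getD p.1 "" ++ "," ++ p.2 else p.2)
      PySem.Dict.empty, PySem.Dict.keys_empty]
  have hkeysG : dG.keys = PySem.Set.update [] (l.map (fun p => p.1)) := by
    rw [hdG, PySem.Dict.keys_foldl_modify_key l (fun p => p.1) []
      (fun d p vs => vs ++ [p.2]) PySem.Dict.empty, PySem.Dict.keys_empty]
  have hndA : dA.keys.Nodup := by
    rw [hdA, pvA_fold_eq]
    exact PySem.Dict.nodup_keys_foldl_insert_key l (fun p => p.1) _ PySem.Dict.empty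
      (by rw [PySem.Dict.keys_empty]; exact List.nodup_nil)
  have hndG : dG.keys.Nodup := by
    rw [hdG]
    exact PySem.Dict.nodup_keys_foldl_modify_key l (fun p => p.1) [] _ PySem.Dict.empty
      (by rw [PySem.Dict.keys_empty]; exact List.nodup_nil)
  rw [PySem.Dict.items_eq_map_keys dA hndA "", PySem.Dict.items_eq_map_keys dG hndG []]
  rw [hkeysA, hkeysG, List.map_map]
  apply List.map_congr_left
  intro k hk
  simp only [Function.comp]
  congr 1
  -- the joined group at k equals A's accumulated string
  have hG : dG.getD k [] = (l.filter (fun p => p.1 == k)).map (fun p => p.2) := by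
    rw [hdG]
    rw [PySem.Dict.getD_foldl_modify_append l PySem.Dict.empty k, PySem.Dict.getD_empty]
    simp
  have hmem : k ∈ l.map (fun p => p.1) := by
    rw [PySem.Set.update_nil_left] at hk
    exact (PySem.Set.mem_ofList _ _).mp hk
  have hfilter_ne : (l.filter (fun p => p.1 == k)) ≠ [] := by
    rcases List.mem_map.mp hmem with ⟨p, hp, hpk⟩
    intro hnil
    have : p ∈ l.filter (fun p => p.1 == k) := List.mem_filter.mpr ⟨hp, by simp [hpk]⟩
    rw [hnil] at this; exact absurd this (List.not_mem_nil)
  have hA : dA.get? k = ((l.filter (fun p => p.1 == k)).map (fun p => p.2)).foldl pvStep none := by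
    rw [hdA, pvA_get? l PySem.Dict.empty k, PySem.Dict.get?_empty]
  cases hflt : l.filter (fun p => p.1 == k) with
  | nil => exact absurd hflt hfilter_ne
  | cons q qs =>
      rw [hflt] at hA hG
      simp only [List.map_cons, List.foldl_cons, pvStep] at hA
      rw [pvFoldl_step_join] at hA
      rw [PySem.Dict.getD_eq_get?_getD, hA, hG]
      rfl

-- ===== VERDICT (by name: the statement is the Claim_ definition above) =====
theorem wide_tup_list_to_dict_spec : Claim_equal_wide_tup_list_to_dict := by
  intro l _
  exact wide_tup_list_to_dict_eq_alt l
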